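-- pv_equiv track=rewrite | github.com/pypi-data/pypi-mirror-234 | packages/confspace/confspace-0.0.2.tar.gz/confspace-0.0.2/confspace/__init__.py | get_diviser
-- ===== SOURCE A (Python) =====
-- def get_diviser(search_space:dict)->dict:
--
--     # diviser 구하기
--     length_list = [len(space) for space in search_space.values()]
--     diviser_list = [1 for i in range(len(length_list))]
--     for i in range(len(length_list)-1, 0, -1):
--         diviser_list[i-1] = diviser_list[i]*length_list[i]
--
--     # dict로 변환
--     diviser = {}
--     for i, key in enumerate(search_space.keys()):
--         diviser[key] = diviser_list[i]
--     return diviser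
-- ===== SOURCE B (Python) =====
-- def get_diviser(search_space: dict) -> dict:
--     # brute force: for each key, the divisor is the product of the lengths
--     # of all LATER spaces, computed directly by an inner scan over the tail
--     # (no suffix-product accumulator, no index-filled divisor list)
--     items = list(search_space.items())
--     out = {}
--     for i, (key, _) in enumerate(items):
--         d = 1
--         for _, space in items[i + 1:]:
--             d *= len(space)
--         out[key] = d
--     return out
-- ===== Notes on version B (the rewrite author's own statement) =====
-- stated objective: alternative
-- what changed: B computes each key's divisor directly as the product of the lengths of all later spaces via a nested tail scan (O(n^2)), instead of A's staged suffix-product construction (lengths list, backward index-fill, forward dict build).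
import Mathlib
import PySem

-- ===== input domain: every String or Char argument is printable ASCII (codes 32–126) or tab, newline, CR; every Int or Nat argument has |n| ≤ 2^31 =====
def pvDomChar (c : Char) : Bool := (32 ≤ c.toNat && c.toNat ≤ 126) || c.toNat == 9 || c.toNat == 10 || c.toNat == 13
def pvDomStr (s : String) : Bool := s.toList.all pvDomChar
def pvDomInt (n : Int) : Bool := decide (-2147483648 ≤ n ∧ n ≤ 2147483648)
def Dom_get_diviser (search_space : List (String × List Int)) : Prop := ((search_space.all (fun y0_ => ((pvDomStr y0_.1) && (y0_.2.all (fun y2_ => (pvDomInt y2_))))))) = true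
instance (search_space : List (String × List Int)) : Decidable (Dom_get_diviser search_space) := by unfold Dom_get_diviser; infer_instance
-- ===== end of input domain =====

-- B computes each key's divisor directly as the product of the lengths of all later
-- spaces by a nested tail scan, replacing A's staged suffix-product construction
-- (objective: alternative; B is O(n^2) versus A's O(n)).

-- ===== PORT A =====
-- pyGetD/pySetD default forms are exact here: every index used is in range.
def get_diviser (search_space : List (String × List Int)) : List (String × Int) :=
  let length_list : List Int := search_space.map (fun p => (p.2.length : Int))
  let diviser_list : List Int :=
    (PySem.List.pyRange 0 (length_list.length : Int) 1).map (fun _ => (1 : Int))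
  let diviser_list :=
    (PySem.List.pyRange ((length_list.length : Int) - 1) 0 (-1)).foldl
      (fun d i =>
        PySem.List.pySetD d (i - 1)
          (PySem.List.pyGetD d i 0 * PySem.List.pyGetD length_list i 0)) diviser_list
  let diviser :=
    (PySem.List.enumerate (search_space.map Prod.fst) 0).foldl
      (fun d p => d.insert p.2 (PySem.List.pyGetD diviser_list p.1 0)) PySem.Dict.empty
  diviser.items

-- ===== PORT B =====
def get_diviser_alt (search_space : List (String × List Int)) : List (String × Int) :=
  let items := search_space
  let out :=
    (PySem.List.enumerate items 0).foldl
      (fun (d : PySem.Dict String Int) p =>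
        d.insert p.2.1
          ((PySem.List.slice items (some (p.1 + 1)) none).foldl
            (fun acc q => acc * (q.2.length : Int)) 1))
      PySem.Dict.empty
  out.items

-- ===== PRECONDITION & SPEC =====
def Spec_get_diviser (search_space : List (String × List Int)) (out : List (String × Int)) : Prop := out = get_diviser_alt search_space
instance (search_space : List (String × List Int)) (out : List (String × Int)) : Decidable (Spec_get_diviser search_space out) := by unfold Spec_get_diviser; infer_instance

-- ===== CLAIM (what is proved, stated in full; the proofs are below) =====
def Claim_equal_get_diviser : Prop := ∀ (search_space : List (String × List Int)), Dom_get_diviser search_space → Spec_get_diviser search_space (get_diviser search_space)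

-- ===== LEMMAS AND PROOFS =====

-- suffix products of a list of lengths: (suffDiv L)[i] = product of L[i+1:]
def suffDiv : List Int → List Int
  | [] => []
  | _ :: ls => ls.prod :: suffDiv ls

-- the pair list both dict builds insert, in order
def suffPairs : List (String × List Int) → List (String × Int)
  | [] => []
  | x :: t => (x.1, (t.map (fun p => (p.2.length : Int))).prod) :: suffPairs t

theorem suffDiv_length (L : List Int) : (suffDiv L).length = L.length := by
  induction L with
  | nil => rfl
  | cons a t ih => simp [suffDiv, ih]

theorem enum_map_zip (xs : List String) (D : List Int) :
    ∀ (s : Nat), s + xs.length ≤ D.length →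
    (PySem.List.enumerate xs ((s : Nat) : Int)).map
      (fun p => (p.2, PySem.List.pyGetD D p.1 0)) = xs.zip (D.drop s) := by
  induction xs with
  | nil => intro s _; simp [PySem.List.enumerate_nil]
  | cons x t ih =>
    intro s hs
    have hslt : s < D.length := by simp at hs; omega
    have h1 : ((s : Nat) : Int) + 1 = (((s + 1 : Nat)) : Int) := by push_cast; ring
    rw [PySem.List.enumerate_cons, List.map_cons, h1, ih (s + 1) (by simp at hs ⊢; omega)]
    have hg : PySem.List.pyGetD D ((s : Nat) : Int) 0 = D[s] := by
      rw [PySem.List.pyGetD_natCast]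
      exact List.getD_eq_getElem D 0 hslt
    rw [hg, List.drop_eq_getElem_cons hslt, List.zip_cons_cons]

theorem zip_suffPairs (ss : List (String × List Int)) :
    (ss.map Prod.fst).zip (suffDiv (ss.map (fun p => (p.2.length : Int)))) = suffPairs ss := by
  induction ss with
  | nil => rfl
  | cons x t ih => simp [suffDiv, suffPairs, ih]

theorem getD_replicate_append (k : Nat) (a : Int) (rest : List Int) :
    (List.replicate k (1 : Int) ++ a :: rest).getD k 0 = a := by
  induction k with
  | zero => rfl
  | succ k ih =>
    rw [List.replicate_succ, List.cons_append, List.getD_cons_succ, ih]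

theorem set_replicate_append (k : Nat) (v a : Int) (rest : List Int) :
    (List.replicate (k + 1) (1 : Int) ++ a :: rest).set k v
      = List.replicate k 1 ++ v :: a :: rest := by
  induction k with
  | zero => rfl
  | succ k ih =>
    rw [List.replicate_succ (n := k + 1), List.cons_append, List.set_cons_succ, ih,
      List.replicate_succ (n := k), List.cons_append]

-- invariant of A's backward index-fill loop
theorem loopA (L : List Int) :
    ∀ (k : Nat), k < L.length →
    (PySem.List.pyRange ((k : Nat) : Int) 0 (-1)).foldl
      (fun d i =>
        PySem.List.pySetD d (i - 1)
          (PySem.List.pyGetD d i 0 * PySem.List.pyGetD L i 0))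
      (List.replicate k 1 ++ suffDiv (L.drop k)) = suffDiv L := by
  intro k
  induction k with
  | zero =>
    intro _
    rw [PySem.List.pyRange_neg_one_eq_nil (by norm_num)]
    simp
  | succ k ih =>
    intro hk
    have hk' : k < L.length := by omega
    have hk1 : k + 1 < L.length := hk
    have hcast : (((k + 1 : Nat)) : Int) = (k : Int) + 1 := by push_cast; ring
    rw [hcast, PySem.List.pyRange_neg_one_cons (by positivity), List.foldl_cons]
    have hd1 : L.drop (k + 1) = L[k + 1] :: L.drop (k + 2) := List.drop_eq_getElem_cons hk1
    have hd0 : L.drop k = L[k] :: L.drop (k + 1) := List.drop_eq_getElem_cons hk'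
    have hstep :
        PySem.List.pySetD
          (List.replicate (k + 1) (1 : Int) ++ suffDiv (L.drop (k + 1)))
          ((k : Int) + 1 - 1)
          (PySem.List.pyGetD (List.replicate (k + 1) (1 : Int) ++ suffDiv (L.drop (k + 1))) ((k : Int) + 1) 0
            * PySem.List.pyGetD L ((k : Int) + 1) 0)
        = List.replicate k 1 ++ suffDiv (L.drop k) := by
      rw [hd1, hd0]
      have e1 : (k : Int) + 1 - 1 = ((k : Nat) : Int) := by ring
      have e2 : (k : Int) + 1 = (((k + 1 : Nat)) : Int) := by push_cast; ring
      rw [e1, e2, PySem.List.pySetD_natCast, PySem.List.pyGetD_natCast, PySem.List.pyGetD_natCast]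
      show (List.replicate (k + 1) (1 : Int) ++ suffDiv (L[k + 1] :: L.drop (k + 2))).set k _ = _
      rw [show suffDiv (L[k + 1] :: L.drop (k + 2))
            = (L.drop (k + 2)).prod :: suffDiv (L.drop (k + 2)) from rfl]
      rw [getD_replicate_append, List.getD_eq_getElem _ _ hk1, set_replicate_append]
      rw [show suffDiv (L[k] :: L.drop (k + 1))
            = (L.drop (k + 1)).prod :: suffDiv (L.drop (k + 1)) from rfl]
      rw [hd1,
        show suffDiv (L[k + 1] :: L.drop (k + 2))
          = (L.drop (k + 2)).prod :: suffDiv (L.drop (k + 2)) from rfl,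
        List.prod_cons, mul_comm]
    have e3 : (k : Int) + 1 - 1 = ((k : Nat) : Int) := by ring
    rw [hstep, e3, ih hk']

theorem enum_map_zip0 (xs : List String) (D : List Int) (h : xs.length ≤ D.length) :
    (PySem.List.enumerate xs 0).map
      (fun p => (p.2, PySem.List.pyGetD D p.1 0)) = xs.zip D := by
  have := enum_map_zip xs D 0 (by omega)
  simpa using this

theorem foldl_insert_kv {α : Type} (l : List α) (k : α → String) (v : α → Int)
    (d : PySem.Dict String Int) :
    l.foldl (fun d a => d.insert (k a) (v a)) d
      = (l.map (fun a => (k a, v a))).foldl (fun d kv => d.insert kv.1 kv.2) d := by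
  induction l generalizing d with
  | nil => rfl
  | cons a t ih => simp [ih]

-- B's inner tail scan is a running product of lengths
theorem foldl_mul_len (l : List (String × List Int)) :
    ∀ (a : Int), l.foldl (fun acc q => acc * (q.2.length : Int)) a
      = a * (l.map (fun p => (p.2.length : Int))).prod := by
  induction l with
  | nil => intro a; simp
  | cons x t ih => intro a; simp [ih, mul_assoc]

-- B's enumerate + tail-slice scan produces exactly the suffPairs list
theorem enumB (full : List (String × List Int)) :
    ∀ (ss : List (String × List Int)) (s : Nat), full.drop s = ss →
    (PySem.List.enumerate ss ((s : Nat) : Int)).map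
      (fun p => (p.2.1,
        ((PySem.List.slice full (some (p.1 + 1)) none).foldl
          (fun acc q => acc * (q.2.length : Int)) 1)))
      = suffPairs ss := by
  intro ss
  induction ss with
  | nil => intro s _; simp [PySem.List.enumerate_nil, suffPairs]
  | cons x t ih =>
    intro s hs
    have hdrop : full.drop (s + 1) = t := by
      have : full.drop (s + 1) = (full.drop s).drop 1 := by
        rw [List.drop_drop]
      rw [this, hs]; rfl
    have h1 : ((s : Nat) : Int) + 1 = (((s + 1 : Nat)) : Int) := by push_cast; ring
    rw [PySem.List.enumerate_cons, List.map_cons, h1, ih (s + 1) hdrop]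
    rw [show ((((s + 1 : Nat)) : Int)) = (((s + 1 : Nat) : Nat) : Int) from rfl]
    rw [PySem.List.slice_from_natCast, hdrop, foldl_mul_len, one_mul]
    rfl

-- ===== VERDICT (by name: the statement is the Claim_ definition above) =====
theorem get_diviser_spec : Claim_equal_get_diviser := by
  intro ss _
  show get_diviser ss = get_diviser_alt ss
  cases ss with
  | nil => decide
  | cons x t =>
    set ss := x :: t with hss
    have hne : ss.length ≠ 0 := by simp [hss]
    unfold get_diviser get_diviser_alt
    dsimp only
    set L : List Int := ss.map (fun p => (p.2.length : Int)) with hL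
    have hLlen : L.length = ss.length := by simp [hL]
    -- initial diviser_list is replicate n 1
    have hinit : (PySem.List.pyRange 0 ((L.length : Nat) : Int) 1).map (fun _ => (1 : Int))
        = List.replicate L.length 1 := by
      rw [PySem.List.pyRange_one]
      refine List.eq_replicate_iff.mpr ⟨by simp, ?_⟩
      intro b hb
      rcases List.mem_map.mp hb with ⟨a, -, rfl⟩
      rfl
    have hn1 : L.length - 1 + 1 = L.length := by omega
    have hdroplen : (L.drop (L.length - 1)).length = 1 := by
      rw [List.length_drop]; omega
    obtain ⟨a, ha⟩ := List.length_eq_one_iff.mp hdroplen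
    have hsplit : List.replicate L.length (1 : Int)
        = List.replicate (L.length - 1) 1 ++ suffDiv (L.drop (L.length - 1)) := by
      rw [ha, show suffDiv [a] = [1] from rfl, ← List.replicate_succ', hn1]
    have hcast2 : ((L.length : Nat) : Int) - 1 = (((L.length - 1 : Nat)) : Int) := by
      omega
    rw [hinit, hsplit, hcast2, loopA L (L.length - 1) (by omega)]
    -- A's final dict build: fold over the mapped pair list = suffPairs
    rw [foldl_insert_kv (PySem.List.enumerate (ss.map Prod.fst) 0)
          (fun p => p.2) (fun p => PySem.List.pyGetD (suffDiv L) p.1 0) PySem.Dict.empty]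
    rw [enum_map_zip0 (ss.map Prod.fst) (suffDiv L)
          (by rw [suffDiv_length, hLlen]; simp)]
    rw [zip_suffPairs]
    -- B's dict build: fold over the same pair list
    rw [foldl_insert_kv (PySem.List.enumerate ss 0)
          (fun p => p.2.1)
          (fun p => ((PySem.List.slice ss (some (p.1 + 1)) none).foldl
            (fun acc q => acc * (q.2.length : Int)) 1)) PySem.Dict.empty]
    have hB := enumB ss ss 0 (by simp)
    rw [show ((0 : Int)) = ((0 : Nat) : Int) from rfl, hB]
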